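-- pv_equiv track=rewrite | github.com/ethanmolnar06/Acquire | objects/tilebag.py | make_tileLetterTable
-- ===== SOURCE A (Python) =====
-- import string
-- import itertools
--
-- def make_tileLetterTable(n: int) -> list[str]:
--   maxletterlength = (n-1)//26
--   tileLetters = [[]]*(maxletterlength+1)
--   letters = [''] + list(string.ascii_uppercase)
--   for i in range(maxletterlength+1):
--     tileLetters[i] = [letters[i] + l for l in letters[1:]]
--   if n%26 != 0: tileLetters[-1] = tileLetters[-1][:n%26]
--   return list(itertools.chain(*tileLetters))
-- ===== SOURCE B (Python) =====
-- import string
--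
-- def make_tileLetterTable(n: int) -> list[str]:
--   U = string.ascii_uppercase
--   return [('' if i // 26 == 0 else U[i // 26 - 1]) + U[i % 26] for i in range(n)]
-- ===== Notes on version B (the rewrite author's own statement) =====
-- stated objective: simpler
-- what changed: Replaces A's row-by-row comprehensions, itertools.chain flattening and trailing-row trim with a single flat comprehension over range(n) that computes each label directly from i // 26 and i % 26, so no intermediate table and no trimming step exist; Pre_ excludes only the inputs on which A raises IndexError (n >= 703 and negative n not divisible by 26).
-- outside the precondition, e.g. on make_tileLetterTable(703): A raises IndexError, B raises IndexError; on make_tileLetterTable(-1): A raises IndexError, B returns []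
import Mathlib
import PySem

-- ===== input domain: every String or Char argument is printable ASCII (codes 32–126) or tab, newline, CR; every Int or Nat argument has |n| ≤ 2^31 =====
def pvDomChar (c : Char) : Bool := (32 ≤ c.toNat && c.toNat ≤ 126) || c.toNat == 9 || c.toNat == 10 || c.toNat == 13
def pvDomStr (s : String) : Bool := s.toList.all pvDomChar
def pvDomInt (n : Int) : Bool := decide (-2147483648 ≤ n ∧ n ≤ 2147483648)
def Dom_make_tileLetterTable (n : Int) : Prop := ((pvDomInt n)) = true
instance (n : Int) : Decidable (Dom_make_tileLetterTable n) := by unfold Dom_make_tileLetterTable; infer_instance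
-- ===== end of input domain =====

-- B replaces A's per-row comprehensions + itertools.chain + trailing trim by one flat
-- comprehension computing each label from its index i via i // 26 and i % 26 (objective: simpler).


-- shared module constant: string.ascii_uppercase as the list of its one-letter strings
def pyUpper : List String :=
  ["A","B","C","D","E","F","G","H","I","J","K","L","M",
   "N","O","P","Q","R","S","T","U","V","W","X","Y","Z"]

-- ===== PORT A =====
def make_tileLetterTable (n : Int) : List String :=
  let maxletterlength := PySem.Int.floordiv (n - 1) 26
  let letters : List String := "" :: pyUpper
  let tileLetters : List (List String) :=
    (PySem.List.pyRange 0 (maxletterlength + 1) 1).map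
      (fun i => (PySem.List.slice letters (some 1) none).map
        (fun l => PySem.List.pyGetD letters i "" ++ l))
  let tileLetters :=
    if PySem.Int.mod n 26 ≠ 0 then
      PySem.List.pySetD tileLetters (-1)
        (PySem.List.slice (PySem.List.pyGetD tileLetters (-1) []) none (some (PySem.Int.mod n 26)))
    else tileLetters
  tileLetters.flatten

-- ===== PORT B =====
def make_tileLetterTable_alt (n : Int) : List String :=
  (PySem.List.pyRange 0 n 1).map (fun i =>
    (if PySem.Int.floordiv i 26 = 0 then ""
     else PySem.List.pyGetD pyUpper (PySem.Int.floordiv i 26 - 1) "") ++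
    PySem.List.pyGetD pyUpper (PySem.Int.mod i 26) "")

-- ===== PRECONDITION & SPEC =====
-- Pre_ excludes exactly the inputs on which the Python A raises IndexError: n ≥ 703
-- (letters[i] out of range) and negative n not divisible by 26 (tileLetters[-1] on an empty table).
def Pre_make_tileLetterTable (n : Int) : Prop :=
  n ≤ 702 ∧ (n < 0 → PySem.Int.mod n 26 = 0)
instance (n : Int) : Decidable (Pre_make_tileLetterTable n) := by
  unfold Pre_make_tileLetterTable; infer_instance
def pvWitness_make_tileLetterTable : Int := 27

def Spec_make_tileLetterTable (n : Int) (out : List String) : Prop := out = make_tileLetterTable_alt n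
instance (n : Int) (out : List String) : Decidable (Spec_make_tileLetterTable n out) := by unfold Spec_make_tileLetterTable; infer_instance

-- ===== CLAIM (what is proved, stated in full; the proofs are below) =====
def Claim_equal_make_tileLetterTable : Prop := ∀ (n : Int), Dom_make_tileLetterTable n → Pre_make_tileLetterTable n → Spec_make_tileLetterTable n (make_tileLetterTable n)

-- ===== LEMMAS AND PROOFS =====

-- B's per-element label (beta-reduced body of B's comprehension)
def labelB (i : Int) : String :=
  (if PySem.Int.floordiv i 26 = 0 then ""
   else PySem.List.pyGetD pyUpper (PySem.Int.floordiv i 26 - 1) "") ++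
  PySem.List.pyGetD pyUpper (PySem.Int.mod i 26) ""

-- A's row i (beta/zeta-reduced body of A's per-row comprehension)
def rowA (i : Int) : List String :=
  (PySem.List.slice ("" :: pyUpper) (some 1) none).map
    (fun l => PySem.List.pyGetD ("" :: pyUpper) i "" ++ l)

lemma altB (n : Int) : make_tileLetterTable_alt n = (PySem.List.pyRange 0 n 1).map labelB := rfl

lemma A_def (n : Int) : make_tileLetterTable n =
    (if PySem.Int.mod n 26 ≠ 0 then
      PySem.List.pySetD ((PySem.List.pyRange 0 (PySem.Int.floordiv (n - 1) 26 + 1) 1).map rowA) (-1)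
        (PySem.List.slice
          (PySem.List.pyGetD ((PySem.List.pyRange 0 (PySem.Int.floordiv (n - 1) 26 + 1) 1).map rowA) (-1) [])
          none (some (PySem.Int.mod n 26)))
    else (PySem.List.pyRange 0 (PySem.Int.floordiv (n - 1) 26 + 1) 1).map rowA).flatten := rfl

lemma pref_eq (i : Int) (hi : 0 ≤ i) :
    PySem.List.pyGetD ("" :: pyUpper) i "" =
      if i = 0 then "" else PySem.List.pyGetD pyUpper (i - 1) "" := by
  lift i to ℕ using hi
  cases i with
  | zero => simp
  | succ k =>
    have h1 : ((k+1 : ℕ) : Int) - 1 = (k : Int) := by push_cast; ring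
    have h2 : ((k+1 : ℕ) : Int) = (k:Int) + 1 := by push_cast; ring
    rw [h1, h2]
    have h3 : ¬ ((k:Int) + 1 = 0) := by omega
    rw [if_neg h3, ← h2, PySem.List.pyGetD_natCast, PySem.List.pyGetD_natCast]
    simp [List.getD]

lemma labelB_decomp (i k : Int) (hi : 0 ≤ i) (hk : 0 ≤ k) (hk26 : k < 26) :
    labelB (26 * i + k) =
      PySem.List.pyGetD ("" :: pyUpper) i "" ++ PySem.List.pyGetD pyUpper k "" := by
  have hq : PySem.Int.floordiv (26 * i + k) 26 = i := by
    rw [PySem.Int.floordiv_eq_iff_of_pos (by omega)]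
    omega
  have hm : PySem.Int.mod (26 * i + k) 26 = k := by
    have := PySem.Int.floordiv_mul_add_mod (26 * i + k) 26
    rw [hq] at this
    omega
  rw [labelB, hq, hm, pref_eq i hi]

lemma map_eq_map_range (f : String → String) (xs : List String) (d : String) :
    xs.map f = (List.range xs.length).map (fun k => f (xs.getD k d)) := by
  symm
  apply List.ext_getElem (by simp)
  intro j h1 h2
  have hj : j < xs.length := by simpa using h2
  simp [List.getD_eq_getElem?_getD, List.getElem?_eq_getElem hj]

lemma row_eq (i : Int) (hi : 0 ≤ i) :
    rowA i = (PySem.List.pyRange (26 * i) (26 * i + 26) 1).map labelB := by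
  rw [PySem.List.pyRange_one]
  have h26 : (26 * i + 26 - 26 * i).toNat = 26 := by omega
  rw [h26, List.map_map]
  rw [List.map_congr_left (fun k hk => by
    have hk26 : k < 26 := List.mem_range.mp hk
    show (labelB ∘ fun k : ℕ => 26 * i + (k:Int)) k = PySem.List.pyGetD ("" :: pyUpper) i "" ++ pyUpper.getD k ""
    simp only [Function.comp_apply]
    rw [labelB_decomp i k hi (by omega) (by omega), PySem.List.pyGetD_natCast])]
  rw [rowA, PySem.List.slice_from_one]
  show List.map (fun l => PySem.List.pyGetD ("" :: pyUpper) i "" ++ l) pyUpper = _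
  rw [map_eq_map_range _ pyUpper ""]
  rfl

lemma flat_eq (q : Nat) :
    (((PySem.List.pyRange 0 (q : Int) 1).map rowA).flatten) =
      (PySem.List.pyRange 0 (26 * (q : Int)) 1).map labelB := by
  induction q with
  | zero => simp
  | succ p ih =>
    have hc : ((p + 1 : ℕ) : Int) = (p : Int) + 1 := by push_cast; ring
    rw [hc, PySem.List.pyRange_one_succ_right (by positivity), List.map_append, List.flatten_append]
    rw [List.map_singleton, List.flatten_cons, List.flatten_nil, List.append_nil, ih]
    rw [row_eq (p : Int) (by positivity)]
    rw [← List.map_append]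
    have h26 : 26 * ((p:Int) + 1) = 26 * (p:Int) + 26 := by ring
    rw [h26, PySem.List.pyRange_one_append 0 (26 * (p:Int)) (26 * (p:Int) + 26) (by positivity) (by omega)]

lemma pySetD_neg_one_append (xs : List (List String)) (x v : List String) :
    PySem.List.pySetD (xs ++ [x]) (-1) v = xs ++ [v] := by
  simp [PySem.List.pySetD, PySem.List.pySet?, PySem.List.pyIdx?]

-- ===== VERDICT (by name: the statement is the Claim_ definition above) =====
theorem make_tileLetterTable_spec : Claim_equal_make_tileLetterTable := by
  intro n _ hpre
  unfold Spec_make_tileLetterTable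
  rcases (by omega : n ≤ 0 ∨ 0 < n) with hn | hn
  · -- n ≤ 0 : both sides []
    have hmod : PySem.Int.mod n 26 = 0 := by
      rcases (Int.le_iff_lt_or_eq.mp hn) with h | h
      · exact hpre.2 h
      · subst h; decide
    have hm : PySem.Int.floordiv (n - 1) 26 < 0 := by
      rw [PySem.Int.floordiv_lt_iff_lt_mul (by omega)]; omega
    rw [A_def, altB, if_neg (not_not_intro hmod),
      PySem.List.pyRange_one_eq_nil (by omega), PySem.List.pyRange_one_eq_nil (by omega)]
    simp
  · -- n > 0
    have hqr := PySem.Int.floordiv_mul_add_mod n 26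
    have hr0 : 0 ≤ PySem.Int.mod n 26 := PySem.Int.mod_nonneg n (by omega)
    have hr26 : PySem.Int.mod n 26 < 26 := PySem.Int.mod_lt n (by omega)
    set q := PySem.Int.floordiv n 26 with hqdef
    set r := PySem.Int.mod n 26 with hrdef
    have hq0 : 0 ≤ q := by omega
    have hn' : n = 26 * q + r := by omega
    by_cases hr : r = 0
    · -- n a positive multiple of 26: no trimming, m + 1 = q full rows
      have hm : PySem.Int.floordiv (n - 1) 26 = q - 1 := by
        rw [PySem.Int.floordiv_eq_iff_of_pos (by omega)]; omega
      have hmodn : PySem.Int.mod n 26 = 0 := by rw [← hrdef]; exact hr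
      rw [A_def, altB, if_neg (not_not_intro hmodn), hm]
      have h1 : q - 1 + 1 = q := by ring
      rw [h1]
      lift q to ℕ using hq0 with qn
      rw [flat_eq qn]
      have h2 : (26:Int) * (qn:Int) = n := by omega
      rw [h2]
    · -- q full rows plus a last row trimmed to r entries
      have hm : PySem.Int.floordiv (n - 1) 26 = q := by
        rw [PySem.Int.floordiv_eq_iff_of_pos (by omega)]; omega
      have hmodn : PySem.Int.mod n 26 ≠ 0 := by rw [← hrdef]; exact hr
      rw [A_def, altB, if_pos hmodn, hm]
      rw [PySem.List.pyRange_one_succ_right hq0, List.map_append, List.map_singleton]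
      rw [PySem.List.pyGetD_neg_one_append_singleton, pySetD_neg_one_append]
      rw [List.flatten_append, List.flatten_cons, List.flatten_nil, List.append_nil]
      rw [PySem.List.slice_to _ hr0, row_eq q hq0]
      rw [PySem.List.pyRange_one (26 * q) (26 * q + 26)]
      have h26 : (26 * q + 26 - 26 * q).toNat = 26 := by omega
      rw [h26, List.map_map, ← List.map_take, List.take_range]
      have hmin : min r.toNat 26 = r.toNat := by omega
      rw [hmin]
      lift q to ℕ using hq0 with qn
      rw [flat_eq qn]
      rw [PySem.List.pyRange_one_append 0 (26 * (qn:Int)) n (by positivity) (by omega), List.map_append]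
      congr 1
      rw [PySem.List.pyRange_one (26 * (qn:Int)) n]
      have hrn : (n - 26 * (qn:Int)).toNat = r.toNat := by omega
      rw [hrn, List.map_map]
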